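-- pv_equiv track=rewrite | github.com/huggin/gfg | hash/topk_numbers_stream.py | kTop
-- ===== SOURCE A (Python) =====
-- def kTop(a, n, k):
--     # code here.
--     ans = []
--     freq = {}
--     pos = {}
--     curr = []
--     for item in a:
--         if item not in pos:
--             curr.append(item)
--             freq[item] = 1
--             pos[item] = len(curr) - 1
--         else:
--             freq[item] += 1
--
--         for j in range(pos[item], 0, -1):
--             if (
--                 freq[curr[j - 1]] < freq[curr[j]]
--                 or freq[curr[j - 1]] == freq[curr[j]]
--                 and curr[j - 1] > curr[j]
--             ):
--                 curr[j - 1], curr[j] = curr[j], curr[j - 1]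
--                 pos[curr[j - 1]] = j - 1
--                 pos[curr[j]] = j
--             else:
--                 break
--
--         ans.extend(curr[:k])
--
--     return ans
-- ===== SOURCE B (Python) =====
-- def kTop(a, n, k):
--     # Per step: update a frequency map and emit the top-k of a freshly
--     # sorted snapshot (freq desc, value asc) -- no incremental list upkeep.
--     freq = {}
--     ans = []
--     for item in a:
--         freq[item] = freq.get(item, 0) + 1
--         top = sorted(freq, key=lambda x: (-freq[x], x))
--         ans.extend(top[:k])
--     return ans
-- ===== Notes on version B (the rewrite author's own statement) =====
-- stated objective: simpler
-- what changed: A incrementally maintains a ranked list with a position dict and adjacent-swap bubbling after each element; B keeps only a frequency dict and re-sorts its keys by (-freq, value) at each step, taking the first k of the snapshot.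
import Mathlib
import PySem

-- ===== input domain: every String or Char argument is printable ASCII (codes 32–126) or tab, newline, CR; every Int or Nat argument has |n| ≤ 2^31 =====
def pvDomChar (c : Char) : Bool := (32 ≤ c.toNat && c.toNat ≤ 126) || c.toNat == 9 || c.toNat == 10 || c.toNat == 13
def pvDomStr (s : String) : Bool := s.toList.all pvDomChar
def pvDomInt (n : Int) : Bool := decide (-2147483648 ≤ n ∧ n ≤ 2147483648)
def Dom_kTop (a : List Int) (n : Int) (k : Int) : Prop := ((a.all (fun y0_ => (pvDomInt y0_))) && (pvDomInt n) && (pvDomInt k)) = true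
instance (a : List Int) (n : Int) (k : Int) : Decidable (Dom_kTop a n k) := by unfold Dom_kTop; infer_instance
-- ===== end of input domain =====

-- B replaces A's incrementally-bubbled ranked list (with a position dict) by re-sorting the
-- frequency dict's keys by (-freq, value) at each step: a simpler, genuinely different algorithm.


-- ===== PORT A =====
-- Python's inner 'for j in range(pos[item], 0, -1)' with break, counted down by a Nat fuel
-- equal to pos[item]; all list indices and dict keys it touches are in range/present by
-- construction (proved below), so the getD defaults are never read.
def kTopBubble (freq : PySem.Dict Int Int) (pos : PySem.Dict Int Int) (curr : List Int) :
    Nat → PySem.Dict Int Int × List Int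
  | 0 => (pos, curr)
  | j + 1 =>
    let u := curr.getD j 0
    let v := curr.getD (j + 1) 0
    if freq.getD u 0 < freq.getD v 0 ∨ (freq.getD u 0 = freq.getD v 0 ∧ v < u) then
      kTopBubble freq ((pos.insert v (j : Int)).insert u ((j : Int) + 1))
        ((curr.set j v).set (j + 1) u) j
    else
      (pos, curr)

def kTopStep (k : Int) (st : List Int × PySem.Dict Int Int × PySem.Dict Int Int × List Int)
    (item : Int) : List Int × PySem.Dict Int Int × PySem.Dict Int Int × List Int :=
  let (ans, freq, pos, curr) := st
  let (freq, pos, curr) :=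
    if pos.contains item = false then
      (freq.insert item 1, pos.insert item ((curr.length : Int)), curr ++ [item])
    else
      (freq.modify item 0 (· + 1), pos, curr)
  let (pos, curr) := kTopBubble freq pos curr (pos.getD item 0).toNat
  (ans ++ PySem.List.slice curr none (some k), freq, pos, curr)

def kTop (a : List Int) (n : Int) (k : Int) : List Int :=
  (a.foldl (kTopStep k) ([], PySem.Dict.empty, PySem.Dict.empty, [])).1

-- ===== PORT B =====
-- Source B: freq[item] = freq.get(item, 0) + 1; top = sorted(freq, key=lambda x: (-freq[x], x));
-- ans.extend(top[:k]).  freq[x] in the key is present for every key x, so getD's default is never read.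
def kTopAltStep (k : Int) (st : PySem.Dict Int Int × List Int) (item : Int) :
    PySem.Dict Int Int × List Int :=
  let (freq, ans) := st
  let freq := freq.insert item (freq.getD item 0 + 1)
  let top := PySem.List.sorted2 freq.keys (fun x => -(freq.getD x 0)) (fun x => x)
  (freq, ans ++ PySem.List.slice top none (some k))

def kTop_alt (a : List Int) (n : Int) (k : Int) : List Int :=
  (a.foldl (kTopAltStep k) (PySem.Dict.empty, [])).2

-- ===== PRECONDITION & SPEC =====
def Spec_kTop (a : List Int) (n : Int) (k : Int) (out : List Int) : Prop := out = kTop_alt a n k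
instance (a : List Int) (n : Int) (k : Int) (out : List Int) : Decidable (Spec_kTop a n k out) := by unfold Spec_kTop; infer_instance

-- ===== CLAIM (what is proved, stated in full; the proofs are below) =====
def Claim_equal_kTop : Prop := ∀ (a : List Int) (n : Int) (k : Int), Dom_kTop a n k → Spec_kTop a n k (kTop a n k)

-- ===== LEMMAS AND PROOFS =====

-- the strict order A keeps its list in and B sorts by: frequency desc, value asc
def Rp (f : Int → Int) (a b : Int) : Prop := f b < f a ∨ (f a = f b ∧ a < b)

lemma Rp_trans (f : Int → Int) {a b c : Int} (h1 : Rp f a b) (h2 : Rp f b c) : Rp f a c := by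
  unfold Rp at *; rcases h1 with h | ⟨h, h'⟩ <;> rcases h2 with g | ⟨g, g'⟩ <;>
    first | (left; omega) | (right; omega)

lemma Rp_asymm (f : Int → Int) {a b : Int} (h1 : Rp f a b) (h2 : Rp f b a) : False := by
  unfold Rp at *; omega

-- insertBy facts
lemma insertBy_perm {α : Type} (b : α → α → Bool) (x : α) (l : List α) :
    (PySem.List.insertBy b x l).Perm (x :: l) := by
  induction l with
  | nil => simp [PySem.List.insertBy]
  | cons y ys ih =>
      simp only [PySem.List.insertBy]
      split
      · exact List.Perm.refl _
      · exact (ih.cons y).trans (List.Perm.swap x y ys)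

lemma insertBy_pairwise {α : Type} {R : α → α → Prop} (b : α → α → Bool) (x : α) (l : List α)
    (htrans : ∀ p q r : α, R p q → R q r → R p r)
    (h1 : ∀ y ∈ l, b x y = true → R x y) (h2 : ∀ y ∈ l, b x y = false → R y x)
    (hl : l.Pairwise R) : (PySem.List.insertBy b x l).Pairwise R := by
  induction l with
  | nil => simp [PySem.List.insertBy]
  | cons y ys ih =>
      simp only [PySem.List.insertBy]
      rcases List.pairwise_cons.mp hl with ⟨hy, hys⟩
      split
      · rename_i hb
        refine List.pairwise_cons.mpr ⟨?_, hl⟩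
        intro z hz
        rcases List.mem_cons.mp hz with rfl | hz
        · exact h1 z (by simp) hb
        · exact htrans _ _ _ (h1 y (by simp) hb) (hy z hz)
      · rename_i hb
        refine List.pairwise_cons.mpr ⟨?_, ?_⟩
        · intro z hz
          rcases (PySem.List.mem_insertBy b x z ys).mp hz with rfl | hz
          · exact h2 y (by simp) (by simpa using hb)
          · exact hy z hz
        · exact ih (fun z hz => h1 z (by simp [hz])) (fun z hz => h2 z (by simp [hz])) hys

-- sorted(xs, key=lambda x: (-f(x), x)) is the unique Rp-sorted rearrangement of xs
lemma foldl_insertBy_perm {α : Type} (b : α → α → Bool) :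
    ∀ (xs acc : List α), (xs.foldl (fun a x => PySem.List.insertBy b x a) acc).Perm (acc ++ xs) := by
  intro xs
  induction xs with
  | nil => simp
  | cons x xs ih =>
      intro acc
      simp only [List.foldl_cons]
      exact (ih _).trans (((insertBy_perm b x acc).append_right xs).trans List.perm_middle.symm)

lemma foldl_insertBy_pairwise {α : Type} {R : α → α → Prop} (b : α → α → Bool)
    (htrans : ∀ p q r : α, R p q → R q r → R p r)
    (htot : ∀ a c : α, a ≠ c → (b a c = true → R a c) ∧ (b a c = false → R c a)) :
    ∀ (xs acc : List α), acc.Pairwise R → (∀ x ∈ xs, x ∉ acc) → xs.Nodup →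
    (xs.foldl (fun a x => PySem.List.insertBy b x a) acc).Pairwise R := by
  intro xs
  induction xs with
  | nil => intro acc h _ _; simpa using h
  | cons x xs ih =>
      intro acc hacc hdisj hnd
      simp only [List.foldl_cons]
      have hx : x ∉ acc := hdisj x (by simp)
      refine ih _ ?_ ?_ (List.nodup_cons.mp hnd).2
      · exact insertBy_pairwise b x acc htrans
          (fun y hy => (htot x y (fun h => hx (h ▸ hy))).1)
          (fun y hy => (htot x y (fun h => hx (h ▸ hy))).2) hacc
      · intro z hz hmem
        rcases (PySem.List.mem_insertBy b x z acc).mp hmem with rfl | hmem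
        · exact (List.nodup_cons.mp hnd).1 hz
        · exact hdisj z (by simp [hz]) hmem

-- sorted(xs, key=lambda x: (-f(x), x)) is the unique Rp-sorted rearrangement of a nodup xs
lemma sorted2_eq (f : Int → Int) (xs ys : List Int) (hnd : xs.Nodup)
    (hperm : ys.Perm xs) (hp : ys.Pairwise (Rp f)) :
    PySem.List.sorted2 xs (fun x => -(f x)) (fun x => x) = ys := by
  have hb : PySem.List.sorted2 xs (fun x => -(f x)) (fun x => x) =
      xs.foldl (fun a x => PySem.List.insertBy
        (fun a c => decide (-(f a) < -(f c)) || (!decide (-(f c) < -(f a)) && decide (a < c))) x a) [] := by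
    simp [PySem.List.sorted2]
  rw [hb]
  set b := fun a c : Int => decide (-(f a) < -(f c)) || (!decide (-(f c) < -(f a)) && decide (a < c)) with hbdef
  have htot : ∀ a c : Int, a ≠ c → (b a c = true → Rp f a c) ∧ (b a c = false → Rp f c a) := by
    intro a c hne
    constructor <;> intro h <;> simp [hbdef, Rp] at * <;> omega
  have hperm' := foldl_insertBy_perm b xs []
  have hpw := foldl_insertBy_pairwise (R := Rp f) b (fun _ _ _ h1 h2 => Rp_trans f h1 h2) htot xs []
    List.Pairwise.nil (by simp) hnd
  have hperm'' : (xs.foldl (fun a x => PySem.List.insertBy b x a) []).Perm ys :=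
    hperm'.trans hperm.symm
  exact hperm''.eq_of_pairwise (fun a b _ _ h1 h2 => absurd h1 (fun h => Rp_asymm f h h2)) hpw hp

-- pos is exactly the index map of curr
def PosOK (pos : PySem.Dict Int Int) (l : List Int) : Prop :=
  ∀ (i : Nat) (v : Int), l[i]? = some v → pos.getD v 0 = (i : Int)

-- the inner bubbling loop: from a list sorted everywhere except that x (at index L.length)
-- may need to move left, it produces an Rp-sorted rearrangement and keeps pos the index map
lemma bubble_spec (freq : PySem.Dict Int Int) :
    ∀ (L : List Int) (x : Int) (R : List Int) (pos : PySem.Dict Int Int),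
    (L ++ x :: R).Nodup →
    PosOK pos (L ++ x :: R) →
    (∀ w, pos.contains w = true ↔ w ∈ L ++ x :: R) →
    (L ++ R).Pairwise (Rp (fun v => freq.getD v 0)) →
    (∀ z ∈ R, Rp (fun v => freq.getD v 0) x z) →
    (kTopBubble freq pos (L ++ x :: R) L.length).2.Perm (L ++ x :: R) ∧
    (kTopBubble freq pos (L ++ x :: R) L.length).2.Pairwise (Rp (fun v => freq.getD v 0)) ∧
    PosOK (kTopBubble freq pos (L ++ x :: R) L.length).1 (kTopBubble freq pos (L ++ x :: R) L.length).2 ∧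
    (∀ w, (kTopBubble freq pos (L ++ x :: R) L.length).1.contains w = true ↔ w ∈ L ++ x :: R) := by
  intro L
  induction L using List.reverseRecOn with
  | nil =>
      intro x R pos hnd hpos hcont hpw hxR
      refine ⟨List.Perm.refl _, ?_, hpos, hcont⟩
      simp only [List.nil_append] at *
      exact List.pairwise_cons.mpr ⟨hxR, hpw⟩
  | append_singleton L y ih =>
      intro x R pos hnd hpos hcont hpw hxR
      have hl : (L ++ [y]) ++ x :: R = L ++ y :: x :: R := by simp
      have hlr : (L ++ [y]) ++ R = L ++ y :: R := by simp
      have hlen : (L ++ [y]).length = L.length + 1 := by simp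
      rw [hl, hlen]
      rw [hl] at hnd hpos hcont
      rw [hlr] at hpw
      -- nodup facts
      rcases List.nodup_append.mp hnd with ⟨hLnd, hyxRnd, hdisj⟩
      rcases List.nodup_cons.mp hyxRnd with ⟨hyNot, hxRnd⟩
      rcases List.nodup_cons.mp hxRnd with ⟨hxNot, hRnd⟩
      have hxy : x ≠ y := fun h => hyNot (h ▸ List.mem_cons_self)
      -- the two inspected entries
      have hu : (L ++ y :: x :: R).getD L.length 0 = y := by
        rw [List.getD_eq_getElem?_getD, List.getElem?_append_right (Nat.le_refl _)]
        simp
      have hv : (L ++ y :: x :: R).getD (L.length + 1) 0 = x := by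
        rw [List.getD_eq_getElem?_getD,
          List.getElem?_append_right (by omega : L.length ≤ L.length + 1)]
        have h2 : L.length + 1 - L.length = 1 := by omega
        rw [h2]; simp
      simp only [kTopBubble, hu, hv]
      by_cases hC : freq.getD y 0 < freq.getD x 0 ∨ (freq.getD y 0 = freq.getD x 0 ∧ x < y)
      · -- swap: x moves one place left and the loop continues
        rw [if_pos hC]
        have hset : ((L ++ y :: x :: R).set L.length x).set (L.length + 1) y
            = L ++ x :: y :: R := by
          rw [List.set_append, if_neg (lt_irrefl _)]
          simp only [Nat.sub_self, List.set_cons_zero]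
          rw [List.set_append, if_neg (by omega)]
          have h2 : L.length + 1 - L.length = 1 := by omega
          rw [h2]; simp
        rw [hset]
        have hswap : (L ++ x :: y :: R).Perm (L ++ y :: x :: R) :=
          List.Perm.append_left L (List.Perm.swap y x R)
        have hnd' : (L ++ x :: y :: R).Nodup := hswap.nodup_iff.mpr hnd
        have hpos' : PosOK ((pos.insert x (L.length : Int)).insert y ((L.length : Int) + 1))
            (L ++ x :: y :: R) := by
          intro i v hvv
          by_cases hi : i < L.length
          · rw [List.getElem?_append_left hi] at hvv
            have hvL : v ∈ L := List.mem_of_getElem? hvv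
            have h1 : v ≠ y := hdisj v hvL y (by simp)
            have h2 : v ≠ x := hdisj v hvL x (by simp)
            rw [PySem.Dict.getD_insert_of_ne _ _ _ h1, PySem.Dict.getD_insert_of_ne _ _ _ h2]
            exact hpos i v (by rw [List.getElem?_append_left hi]; exact hvv)
          · have hi := Nat.le_of_not_lt hi
            rw [List.getElem?_append_right hi] at hvv
            rcases hdc : i - L.length with _ | _ | d
            · rw [hdc] at hvv
              simp only [List.getElem?_cons_zero, Option.some.injEq] at hvv
              subst hvv
              rw [PySem.Dict.getD_insert_of_ne _ _ _ hxy, PySem.Dict.getD_insert_self]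
              have : i = L.length := by omega
              simp [this]
            · rw [hdc] at hvv
              simp only [List.getElem?_cons_succ, List.getElem?_cons_zero,
                Option.some.injEq] at hvv
              subst hvv
              rw [PySem.Dict.getD_insert_self]
              have : i = L.length + 1 := by omega
              simp [this]
            · rw [hdc] at hvv
              simp only [List.getElem?_cons_succ] at hvv
              have hvR : v ∈ R := List.mem_of_getElem? hvv
              have h1 : v ≠ y := fun h => hyNot (h ▸ List.mem_cons_of_mem _ hvR)
              have h2 : v ≠ x := fun h => hxNot (h ▸ hvR)
              rw [PySem.Dict.getD_insert_of_ne _ _ _ h1, PySem.Dict.getD_insert_of_ne _ _ _ h2]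
              refine hpos i v ?_
              rw [List.getElem?_append_right hi, hdc]
              simpa using hvv
        have hcont' : ∀ w, ((pos.insert x (L.length : Int)).insert y
            ((L.length : Int) + 1)).contains w = true ↔ w ∈ L ++ x :: y :: R := by
          intro w
          rw [PySem.Dict.contains_insert, PySem.Dict.contains_insert]
          have := hcont w
          simp only [List.mem_append, List.mem_cons] at this ⊢
          simp only [Bool.or_eq_true, beq_iff_eq]
          tauto
        have hpw' : (L ++ y :: R).Pairwise (Rp (fun v => freq.getD v 0)) := hpw
        have hxz' : ∀ z ∈ y :: R, Rp (fun v => freq.getD v 0) x z := by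
          intro z hz
          rcases List.mem_cons.mp hz with rfl | hz
          · simp only [Rp]; omega
          · exact hxR z hz
        obtain ⟨p1, p2, p3, p4⟩ := ih x (y :: R) _ hnd' hpos' hcont' hpw' hxz'
        refine ⟨p1.trans hswap, p2, p3, ?_⟩
        intro w
        rw [p4 w]
        exact ⟨fun h => hswap.mem_iff.mp h, fun h => hswap.mem_iff.mpr h⟩
      · -- no swap: the loop breaks; the list is already in order
        rw [if_neg hC]
        refine ⟨List.Perm.refl _, ?_, hpos, hcont⟩
        rcases List.pairwise_append.mp hpw with ⟨hLp, hyRp, hcross⟩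
        rcases List.pairwise_cons.mp hyRp with ⟨hyR, hRp⟩
        have hyx : Rp (fun v => freq.getD v 0) y x := by simp only [Rp]; omega
        refine List.pairwise_append.mpr ⟨hLp, ?_, ?_⟩
        · refine List.pairwise_cons.mpr ⟨?_, List.pairwise_cons.mpr ⟨hxR, hRp⟩⟩
          intro z hz
          rcases List.mem_cons.mp hz with rfl | hz
          · exact hyx
          · exact hyR z hz
        · intro a ha b hb
          rcases List.mem_cons.mp hb with rfl | hb
          · exact hcross a ha b List.mem_cons_self
          · rcases List.mem_cons.mp hb with rfl | hb
            · exact Rp_trans _ (hcross a ha y List.mem_cons_self) hyx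
            · exact hcross a ha b (List.mem_cons_of_mem _ hb)

-- invariants carried along the stream
def InvA (p : List Int) (freq pos : PySem.Dict Int Int) (curr : List Int) : Prop :=
  curr.Nodup ∧ (∀ v, v ∈ curr ↔ v ∈ p) ∧ (∀ v, freq.getD v 0 = (p.count v : Int)) ∧
  (∀ v, pos.contains v = true ↔ v ∈ curr) ∧ PosOK pos curr ∧
  curr.Pairwise (Rp (fun v => freq.getD v 0))

def InvB (p : List Int) (freqB : PySem.Dict Int Int) : Prop :=
  freqB.keys.Nodup ∧ (∀ v, v ∈ freqB.keys ↔ v ∈ p) ∧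
  (∀ v, freqB.getD v 0 = (p.count v : Int))

lemma step_spec (k : Int) (p : List Int) (item : Int) (ans : List Int)
    (freq pos : PySem.Dict Int Int) (curr : List Int) (freqB : PySem.Dict Int Int)
    (hA : InvA p freq pos curr) (hB : InvB p freqB) :
    ∃ t freq' pos' curr' freqB',
      kTopStep k (ans, freq, pos, curr) item = (ans ++ t, freq', pos', curr') ∧
      kTopAltStep k (freqB, ans) item = (freqB', ans ++ t) ∧
      InvA (p ++ [item]) freq' pos' curr' ∧ InvB (p ++ [item]) freqB' := by
  obtain ⟨hnd, hmem, hfr, hcont, hpos, hpw⟩ := hA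
  obtain ⟨hBnd, hBmem, hBfr⟩ := hB
  have hcnt : ∀ v : Int, ((p ++ [item]).count v : Int)
      = (p.count v : Int) + (if v = item then 1 else 0) := by
    intro v
    simp only [List.count_append, List.count_cons, List.count_nil, beq_iff_eq, Nat.zero_add]
    by_cases h : v = item
    · subst h; simp
    · rw [if_neg (fun hh => h hh.symm), if_neg h]; simp
  set freqB' := freqB.insert item (freqB.getD item 0 + 1) with hBdef
  have hfB' : ∀ v, freqB'.getD v 0 = ((p ++ [item]).count v : Int) := by
    intro v
    rw [hBdef, PySem.Dict.getD_insert, hcnt v]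
    by_cases h : v = item
    · subst h; rw [if_pos rfl, hBfr]; simp
    · rw [if_neg h, hBfr, if_neg h]; simp
  have hBnd' : freqB'.keys.Nodup := PySem.Dict.nodup_keys_insert _ _ _ hBnd
  have hBmem' : ∀ v, v ∈ freqB'.keys ↔ v ∈ p ++ [item] := by
    intro v; rw [hBdef, PySem.Dict.mem_keys_insert]
    simp only [List.mem_append, List.mem_cons, List.not_mem_nil, or_false]
    rw [hBmem v]; tauto
  by_cases hin : item ∈ p
  · -- item already present: A increments its count and bubbles it from its position
    have hitem : item ∈ curr := (hmem item).mpr hin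
    have hci : pos.contains item = true := (hcont item).mpr hitem
    obtain ⟨L, R, hLR⟩ := List.append_of_mem hitem
    subst hLR
    rcases List.nodup_append.mp hnd with ⟨hLnd, hiRnd, hdisj⟩
    rcases List.nodup_cons.mp hiRnd with ⟨hiNot, hRnd⟩
    have hneL : ∀ v ∈ L, v ≠ item := fun v hv => hdisj v hv item List.mem_cons_self
    have hneR : ∀ v ∈ R, v ≠ item := fun v hv h => hiNot (h ▸ hv)
    set freq1 := freq.modify item 0 (· + 1) with hf1def
    have hf1 : ∀ v, freq1.getD v 0 = ((p ++ [item]).count v : Int) := by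
      intro v; rw [hcnt v]
      by_cases h : v = item
      · subst h; rw [hf1def, PySem.Dict.getD_modify_self, hfr]; simp
      · rw [hf1def, PySem.Dict.getD_modify_of_ne _ _ _ h, hfr, if_neg h]; simp
    have hpw1 : (L ++ R).Pairwise (Rp (fun v => freq1.getD v 0)) := by
      have hsub : (L ++ R).Sublist (L ++ item :: R) :=
        List.Sublist.append_left (List.sublist_cons_self item R) L
      refine (hpw.sublist hsub).imp_of_mem ?_
      intro a b ha hb hr
      have ha' : a ≠ item := by
        rcases List.mem_append.mp ha with h | h
        · exact hneL a h
        · exact hneR a h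
      have hb' : b ≠ item := by
        rcases List.mem_append.mp hb with h | h
        · exact hneL b h
        · exact hneR b h
      simp only [Rp] at hr ⊢
      rw [hf1def, PySem.Dict.getD_modify_of_ne _ _ _ ha', PySem.Dict.getD_modify_of_ne _ _ _ hb']
      exact hr
    have hxz : ∀ z ∈ R, Rp (fun v => freq1.getD v 0) item z := by
      rcases List.pairwise_append.mp hpw with ⟨_, hiRp, _⟩
      rcases List.pairwise_cons.mp hiRp with ⟨hiz, _⟩
      intro z hz
      have h1 := hiz z hz
      have hz' : z ≠ item := hneR z hz
      simp only [Rp] at h1 ⊢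
      rw [hf1def, PySem.Dict.getD_modify_self, PySem.Dict.getD_modify_of_ne _ _ _ hz']
      omega
    obtain ⟨q1, q2, q3, q4⟩ := bubble_spec freq1 L item R pos hnd hpos hcont hpw1 hxz
    set pos2 := (kTopBubble freq1 pos (L ++ item :: R) L.length).1 with hp2
    set curr2 := (kTopBubble freq1 pos (L ++ item :: R) L.length).2 with hc2
    have hcounter : (pos.getD item 0).toNat = L.length := by
      have h0 : (L ++ item :: R)[L.length]? = some item := by
        rw [List.getElem?_append_right (Nat.le_refl _)]; simp
      rw [hpos L.length item h0]; exact Int.toNat_natCast _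
    have hmem2 : ∀ v, v ∈ curr2 ↔ v ∈ p ++ [item] := by
      intro v
      rw [hc2, q1.mem_iff]
      have h1 := hmem v
      simp only [List.mem_append, List.mem_cons, List.not_mem_nil, or_false] at h1 ⊢
      tauto
    have hnd2 : curr2.Nodup := q1.nodup_iff.mpr hnd
    have htop : PySem.List.sorted2 freqB'.keys (fun x => -(freqB'.getD x 0)) (fun x => x) = curr2 := by
      refine sorted2_eq _ _ _ hBnd' ?_ ?_
      · rw [List.perm_ext_iff_of_nodup hnd2 hBnd']
        intro v; rw [hmem2 v, hBmem' v]
      · refine q2.imp_of_mem ?_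
        intro a b _ _ hr
        simp only [Rp] at hr ⊢
        rw [hf1 a, hf1 b] at hr
        rw [hfB' a, hfB' b]
        exact hr
    refine ⟨PySem.List.slice curr2 none (some k), freq1, pos2, curr2, freqB', ?_, ?_, ?_, ?_⟩
    · simp only [kTopStep]
      rw [if_neg (by simp [hci]), hcounter,
        show kTopBubble freq1 pos (L ++ item :: R) L.length = (pos2, curr2) from rfl]
    · simp only [kTopAltStep]
      rw [← hBdef, htop]
    · refine ⟨hnd2, hmem2, hf1, ?_, q3, q2⟩
      intro v
      rw [q4 v, hc2, ← q1.mem_iff]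
    · exact ⟨hBnd', hBmem', hfB'⟩
  · -- first occurrence: A appends item with count 1 and bubbles it from the end
    have hnotc : item ∉ curr := fun h => hin ((hmem item).mp h)
    have hni : pos.contains item = false := by
      rcases Bool.eq_false_or_eq_true (pos.contains item) with h | h
      · exact absurd ((hcont item).mp h) hnotc
      · exact h
    set freq1 := freq.insert item 1 with hf1def
    set pos1 := pos.insert item ((curr.length : Int)) with hp1def
    have hf1 : ∀ v, freq1.getD v 0 = ((p ++ [item]).count v : Int) := by
      intro v; rw [hf1def, PySem.Dict.getD_insert, hcnt v]
      by_cases h : v = item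
      · subst h
        rw [if_pos rfl, if_pos rfl]
        simp [List.count_eq_zero.mpr hin]
      · rw [if_neg h, if_neg h, hfr]; simp
    have hnd1 : (curr ++ item :: []).Nodup := by
      rw [List.nodup_append]
      refine ⟨hnd, by simp, ?_⟩
      intro a ha b hb
      simp only [List.mem_cons, List.not_mem_nil, or_false] at hb
      subst hb
      exact fun h => hnotc (h ▸ ha)
    have hpos1 : PosOK pos1 (curr ++ item :: []) := by
      intro i v hv
      by_cases hi : i < curr.length
      · rw [List.getElem?_append_left hi] at hv
        have hvL : v ∈ curr := List.mem_of_getElem? hv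
        have h1 : v ≠ item := fun h => hnotc (h ▸ hvL)
        rw [hp1def, PySem.Dict.getD_insert_of_ne _ _ _ h1]
        exact hpos i v hv
      · have hi := Nat.le_of_not_lt hi
        rw [List.getElem?_append_right hi] at hv
        rcases hdc : i - curr.length with _ | d
        · rw [hdc] at hv
          simp only [List.getElem?_cons_zero, Option.some.injEq] at hv
          subst hv
          rw [hp1def, PySem.Dict.getD_insert_self]
          have : i = curr.length := by omega
          simp [this]
        · rw [hdc] at hv
          simp at hv
    have hcont1 : ∀ w, pos1.contains w = true ↔ w ∈ curr ++ item :: [] := by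
      intro w
      rw [hp1def, PySem.Dict.contains_insert]
      simp only [Bool.or_eq_true, beq_iff_eq, List.mem_append, List.mem_cons,
        List.not_mem_nil, or_false]
      have := hcont w; tauto
    have hpw1 : (curr ++ []).Pairwise (Rp (fun v => freq1.getD v 0)) := by
      rw [List.append_nil]
      refine hpw.imp_of_mem ?_
      intro a b ha hb hr
      have ha' : a ≠ item := fun h => hnotc (h ▸ ha)
      have hb' : b ≠ item := fun h => hnotc (h ▸ hb)
      simp only [Rp] at hr ⊢
      rw [hf1def, PySem.Dict.getD_insert_of_ne _ _ _ ha', PySem.Dict.getD_insert_of_ne _ _ _ hb']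
      exact hr
    obtain ⟨q1, q2, q3, q4⟩ :=
      bubble_spec freq1 curr item [] pos1 hnd1 hpos1 hcont1 hpw1 (by simp)
    set pos2 := (kTopBubble freq1 pos1 (curr ++ item :: []) curr.length).1 with hp2
    set curr2 := (kTopBubble freq1 pos1 (curr ++ item :: []) curr.length).2 with hc2
    have hcounter : (pos1.getD item 0).toNat = curr.length := by
      rw [hp1def, PySem.Dict.getD_insert_self]; exact Int.toNat_natCast _
    have hmem2 : ∀ v, v ∈ curr2 ↔ v ∈ p ++ [item] := by
      intro v
      rw [hc2, q1.mem_iff]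
      simp only [List.mem_append, List.mem_cons, List.not_mem_nil, or_false]
      rw [hmem v]
    have hnd2 : curr2.Nodup := q1.nodup_iff.mpr hnd1
    have htop : PySem.List.sorted2 freqB'.keys (fun x => -(freqB'.getD x 0)) (fun x => x) = curr2 := by
      refine sorted2_eq _ _ _ hBnd' ?_ ?_
      · rw [List.perm_ext_iff_of_nodup hnd2 hBnd']
        intro v; rw [hmem2 v, hBmem' v]
      · refine q2.imp_of_mem ?_
        intro a b _ _ hr
        simp only [Rp] at hr ⊢
        rw [hf1 a, hf1 b] at hr
        rw [hfB' a, hfB' b]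
        exact hr
    refine ⟨PySem.List.slice curr2 none (some k), freq1, pos2, curr2, freqB', ?_, ?_, ?_, ?_⟩
    · simp only [kTopStep]
      rw [if_pos hni, hcounter,
        show kTopBubble freq1 pos1 (curr ++ [item]) curr.length = (pos2, curr2) from rfl]
    · simp only [kTopAltStep]
      rw [← hBdef, htop]
    · refine ⟨hnd2, hmem2, hf1, ?_, q3, q2⟩
      intro v
      rw [q4 v, hc2, ← q1.mem_iff]
    · exact ⟨hBnd', hBmem', hfB'⟩

lemma fold_spec (k : Int) : ∀ (l p ans : List Int) (freq pos : PySem.Dict Int Int)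
    (curr : List Int) (freqB : PySem.Dict Int Int),
    InvA p freq pos curr → InvB p freqB →
    (l.foldl (kTopStep k) (ans, freq, pos, curr)).1 = (l.foldl (kTopAltStep k) (freqB, ans)).2 := by
  intro l
  induction l with
  | nil => intro p ans freq pos curr freqB _ _; rfl
  | cons x xs ih =>
      intro p ans freq pos curr freqB hA hB
      obtain ⟨t, freq', pos', curr', freqB', hstA, hstB, hA', hB'⟩ :=
        step_spec k p x ans freq pos curr freqB hA hB
      simp only [List.foldl_cons, hstA, hstB]
      exact ih (p ++ [x]) (ans ++ t) freq' pos' curr' freqB' hA' hB'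

-- ===== VERDICT (by name: the statement is the Claim_ definition above) =====
theorem kTop_spec : Claim_equal_kTop := by
  intro a n k _
  unfold Spec_kTop kTop kTop_alt
  refine fold_spec k a [] [] _ _ _ _ ?_ ?_
  · refine ⟨List.nodup_nil, by simp, by simp [PySem.Dict.getD_empty], by simp [PySem.Dict.contains_empty], ?_, List.Pairwise.nil⟩
    intro i v hv; simp at hv
  · exact ⟨by simp [PySem.Dict.keys_empty], by simp [PySem.Dict.keys_empty], by simp [PySem.Dict.getD_empty]⟩
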